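-- pv_equiv track=rewrite | github.com/ecrucru/pychess | lib/pychess/Savers/remotegame.py | adjust_tags
-- ===== SOURCE A (Python) =====
-- CHESS960 = 'Fischerandom'
--
-- def adjust_tags(pgn):
--     # Check
--     if pgn in [None, '']:
--         return pgn
--
--     # Replace the tags
--     reps = [('Variant', 'UltraBullet', ''),
--             ('Variant', 'Bullet', ''),
--             ('Variant', 'Blitz', ''),
--             ('Variant', 'Rapid', ''),
--             ('Variant', 'Classical', ''),
--             ('Variant', 'Correspondence', ''),
--             ('Variant', 'Standard', ''),
--             ('Variant', 'Chess960', CHESS960),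
--             ('Variant', 'ThreeCheck', '3check'),
--             ('Variant', 'Antichess', 'Suicide')]  # TODO Use shared constants
--     for rep in reps:
--         tag, s, d = rep
--         pgn = pgn.replace('[%s "%s"]' % (tag, s), '[%s "%s"]' % (tag, d))
--     pgn = pgn.replace('[Variant ""]\n', '')
--     return pgn
-- ===== SOURCE B (Python) =====
-- CHESS960 = 'Fischerandom'
--
-- # target value for each variant name; '' means the tag becomes empty
-- _TARGET = {'UltraBullet': '', 'Bullet': '', 'Blitz': '', 'Rapid': '',
--            'Classical': '', 'Correspondence': '', 'Standard': '',
--            'Chess960': CHESS960, 'ThreeCheck': '3check', 'Antichess': 'Suicide'}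
-- _RULES = [('[Variant "%s"]' % name, '[Variant "%s"]' % target)
--           for name, target in _TARGET.items()]
--
-- def adjust_tags(pgn):
--     # Check
--     if pgn in [None, '']:
--         return pgn
--
--     # One left-to-right scan: at each '[' rewrite a known variant tag via the table
--     out = []
--     i = 0
--     n = len(pgn)
--     while i < n:
--         c = pgn[i]
--         if c == '[':
--             for tag, new in _RULES:
--                 if pgn.startswith(tag, i):
--                     out.append(new)
--                     i += len(tag)
--                     break
--             else:
--                 out.append(c)
--                 i += 1
--         else:
--             out.append(c)
--             i += 1
--
--     # Drop empty variant tag lines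
--     return ''.join(out).replace('[Variant ""]\n', '')
-- ===== Notes on version B (the rewrite author's own statement) =====
-- stated objective: alternative
-- what changed: B rewrites all variant tags in one left-to-right scan with a name-to-target table (first matching tag at each '['), instead of A's ten sequential full-string replace passes, keeping the single empty-tag-line cleanup replace.
import Mathlib
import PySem

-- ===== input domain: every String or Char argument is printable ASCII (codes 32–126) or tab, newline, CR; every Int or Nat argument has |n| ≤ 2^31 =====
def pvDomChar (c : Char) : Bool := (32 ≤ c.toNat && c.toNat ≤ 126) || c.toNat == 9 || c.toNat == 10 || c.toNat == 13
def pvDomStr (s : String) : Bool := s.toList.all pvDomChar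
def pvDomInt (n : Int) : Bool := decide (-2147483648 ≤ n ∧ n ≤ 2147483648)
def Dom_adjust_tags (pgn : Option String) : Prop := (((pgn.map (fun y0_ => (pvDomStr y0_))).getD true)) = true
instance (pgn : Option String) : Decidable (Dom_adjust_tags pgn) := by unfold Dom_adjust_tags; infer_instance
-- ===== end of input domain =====

-- B rewrites all variant tags in one left-to-right table-driven scan (plus the shared
-- empty-tag-line cleanup) instead of A's ten sequential full-string replace passes;
-- same return value proved on every input.

-- ===== PORT A =====
def pvRepsA : List (String × String × String) :=
  [("Variant", "UltraBullet", ""),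
   ("Variant", "Bullet", ""),
   ("Variant", "Blitz", ""),
   ("Variant", "Rapid", ""),
   ("Variant", "Classical", ""),
   ("Variant", "Correspondence", ""),
   ("Variant", "Standard", ""),
   ("Variant", "Chess960", "Fischerandom"),
   ("Variant", "ThreeCheck", "3check"),
   ("Variant", "Antichess", "Suicide")]

-- the tag-replacement loop and the final cleanup, on a non-empty pgn
def pvBodyA (s : String) : String :=
  -- for rep in reps: pgn = pgn.replace('[%s "%s"]' % (tag, s), '[%s "%s"]' % (tag, d))
  let s2 := pvRepsA.foldl (fun acc rep =>
    PySem.Str.replace acc ("[" ++ rep.1 ++ " \"" ++ rep.2.1 ++ "\"]")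
                          ("[" ++ rep.1 ++ " \"" ++ rep.2.2 ++ "\"]")) s
  -- pgn = pgn.replace('[Variant ""]\n', '')
  PySem.Str.replace s2 "[Variant \"\"]\n" ""

def adjust_tags (pgn : Option String) : Option String :=
  match pgn with
  | none => none
  | some s => if s = "" then some s else some (pvBodyA s)

-- ===== PORT B =====
-- _RULES: (full tag, full replacement); stored here as the tag's tail after its
-- leading '[' paired with the full replacement, because the scanner below tests the
-- leading '[' itself first (pgn.startswith(tag, i) with pgn[i] = '[' ⟺ the tail is
-- a prefix of the rest) — exact for these tags, which all start with '['.
def pvRulesB : List (List Char × List Char) :=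
  [("Variant \"UltraBullet\"]".toList, "[Variant \"\"]".toList),
   ("Variant \"Bullet\"]".toList, "[Variant \"\"]".toList),
   ("Variant \"Blitz\"]".toList, "[Variant \"\"]".toList),
   ("Variant \"Rapid\"]".toList, "[Variant \"\"]".toList),
   ("Variant \"Classical\"]".toList, "[Variant \"\"]".toList),
   ("Variant \"Correspondence\"]".toList, "[Variant \"\"]".toList),
   ("Variant \"Standard\"]".toList, "[Variant \"\"]".toList),
   ("Variant \"Chess960\"]".toList, "[Variant \"Fischerandom\"]".toList),
   ("Variant \"ThreeCheck\"]".toList, "[Variant \"3check\"]".toList),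
   ("Variant \"Antichess\"]".toList, "[Variant \"Suicide\"]".toList)]

-- the inner 'for tag, new in _RULES: if pgn.startswith(tag, i)' loop: first match wins;
-- returns the replacement and the remaining input after the matched tag
def pvFindRule : List (List Char × List Char) → List Char → Option (List Char × List Char)
  | [], _ => none
  | (tag, new) :: rest, l =>
    if tag.isPrefixOf l then some (new, l.drop tag.length) else pvFindRule rest l

-- the 'while i < n' scan; fuel = one unit per loop iteration (each iteration consumes
-- at least one character, so fuel ≥ length never runs out)
def pvScanGo : Nat → List Char → List Char
  | 0, _ => []
  | _ + 1, [] => []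
  | fuel + 1, c :: t =>
    if c = '[' then
      match pvFindRule pvRulesB t with
      | some (new, r) => new ++ pvScanGo fuel r
      | none => c :: pvScanGo fuel t
    else c :: pvScanGo fuel t

def pvScan (l : List Char) : List Char := pvScanGo (l.length + 1) l

def pvBodyB (s : String) : String :=
  -- ''.join(out).replace('[Variant ""]\n', '')
  PySem.Str.replace (String.ofList (pvScan s.toList)) "[Variant \"\"]\n" ""

def adjust_tags_alt (pgn : Option String) : Option String :=
  match pgn with
  | none => none
  | some s => if s = "" then some s else some (pvBodyB s)

-- ===== PRECONDITION & SPEC =====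
def Spec_adjust_tags (pgn : Option String) (out : Option String) : Prop := out = adjust_tags_alt pgn
instance (pgn : Option String) (out : Option String) : Decidable (Spec_adjust_tags pgn out) := by unfold Spec_adjust_tags; infer_instance

-- ===== CLAIM (what is proved, stated in full; the proofs are below) =====
def Claim_equal_adjust_tags : Prop := ∀ (pgn : Option String), Dom_adjust_tags pgn → Spec_adjust_tags pgn (adjust_tags pgn)

-- ===== LEMMAS AND PROOFS =====

-- fuel-free version of PySem.Chars.replace for a nonempty pattern o :: ot
def pvRepl (o : Char) (ot new : List Char) : List Char → List Char
  | [] => []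
  | c :: t =>
    if (o :: ot).isPrefixOf (c :: t) then new ++ pvRepl o ot new (t.drop ot.length)
    else c :: pvRepl o ot new t
termination_by l => l.length
decreasing_by
  · simpa using Nat.lt_succ_of_le (List.length_drop ▸ Nat.sub_le t.length ot.length)
  · simp

lemma pvReplace_go_eq (o : Char) (ot new : List Char) :
    ∀ fuel l acc, l.length ≤ fuel →
      PySem.Chars.replace.go (o :: ot) new fuel l acc = acc.reverse ++ pvRepl o ot new l := by
  intro fuel
  induction fuel with
  | zero =>
    intro l acc h
    have : l = [] := List.eq_nil_of_length_eq_zero (Nat.le_zero.mp h)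
    subst this
    simp [PySem.Chars.replace.go, pvRepl]
  | succ n ih =>
    intro l acc h
    cases l with
    | nil => simp [PySem.Chars.replace.go, pvRepl]
    | cons c t =>
      rw [PySem.Chars.replace.go]
      by_cases hp : (o :: ot).isPrefixOf (c :: t)
      · rw [if_pos hp]
        rw [ih _ _ (by simpa using Nat.le_trans (Nat.sub_le _ _) (Nat.le_of_succ_le_succ h))]
        rw [pvRepl, if_pos hp]
        simp
      · rw [if_neg hp]
        rw [ih _ _ (Nat.le_of_succ_le_succ h)]
        rw [pvRepl, if_neg hp]
        simp

lemma pvReplace_eq (o : Char) (ot new s : List Char) :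
    PySem.Chars.replace s (o :: ot) new = pvRepl o ot new s := by
  rw [PySem.Chars.replace]
  simp only [List.isEmpty_cons, if_false, Bool.false_eq_true]
  simpa using pvReplace_go_eq o ot new s.length s [] le_rfl

-- fuel-free version of PySem.Chars.splitOn with separator ['[']
def pvSplit1 : List Char → List (List Char)
  | [] => [[]]
  | c :: t =>
    if c = '[' then [] :: pvSplit1 t
    else
      match pvSplit1 t with
      | [] => [[c]]
      | h :: r => (c :: h) :: r

lemma pvSplit1_ne_nil (s : List Char) : pvSplit1 s ≠ [] := by
  cases s with
  | nil => simp [pvSplit1]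
  | cons c t =>
    rw [pvSplit1]
    split_ifs
    · simp
    · cases h : pvSplit1 t <;> simp

def pvJoinTail (segs : List (List Char)) : List Char :=
  (segs.map (fun g => '[' :: g)).flatten

lemma pvSplit1_join (s : List Char) :
    s = (pvSplit1 s).headD [] ++ pvJoinTail (pvSplit1 s).tail := by
  induction s with
  | nil => simp [pvSplit1, pvJoinTail]
  | cons c t ih =>
    rw [pvSplit1]
    rcases ht : pvSplit1 t with _ | ⟨h1, r1⟩
    · exact absurd ht (pvSplit1_ne_nil t)
    rw [ht] at ih
    by_cases hc : c = '['
    · subst hc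
      simp only [if_pos rfl, pvJoinTail, List.headD, List.tail, List.map_cons,
        List.flatten_cons, List.nil_append, List.cons_append, List.cons.injEq, true_and]
      simpa [pvJoinTail] using ih
    · rw [if_neg hc]
      simpa [pvJoinTail] using ih

lemma pvSplit1_bf (s : List Char) : ∀ g ∈ pvSplit1 s, '[' ∉ g := by
  induction s with
  | nil => simp [pvSplit1]
  | cons c t ih =>
    rw [pvSplit1]
    by_cases hc : c = '['
    · subst hc
      simpa using ih
    · rw [if_neg hc]
      rcases ht : pvSplit1 t with _ | ⟨h1, r1⟩
      · exact absurd ht (pvSplit1_ne_nil t)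
      · rw [ht] at ih
        intro g hg
        rcases List.mem_cons.mp hg with hg | hg
        · subst hg
          intro hmem
          rcases List.mem_cons.mp hmem with hmem | hmem
          · exact hc hmem.symm
          · exact ih h1 (by simp) hmem
        · exact ih g (by simp [hg])

-- replacing skips over a '['-free block when the pattern starts with '['
lemma pvRepl_bf_append (t new h rest : List Char) (hh : '[' ∉ h) :
    pvRepl '[' t new (h ++ rest) = h ++ pvRepl '[' t new rest := by
  induction h with
  | nil => simp
  | cons c h' ih =>
    have hc : c ≠ '[' := fun e => hh (by simp [e])
    rw [List.cons_append, pvRepl,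
      if_neg (by simp [List.isPrefixOf]; exact fun e => absurd e.symm hc)]
    rw [ih (fun m => hh (by simp [m])), List.cons_append]

lemma pvNPA {p u : List Char} (h1 : ¬ p <+: u) (h2 : ¬ u <+: p) (r : List Char) :
    ¬ p <+: u ++ r := by
  intro h
  rcases List.prefix_or_prefix_of_prefix h (List.prefix_append u r) with h' | h'
  · exact h1 h'
  · exact h2 h'

-- a '['-free pattern tail cannot match across the start of the next '['-segment
lemma pvNoCross (t g rest : List Char) (ht : '[' ∉ t) (hg : ¬ t <+: g)
    (hr : rest = [] ∨ ∃ r', rest = '[' :: r') : ¬ t <+: g ++ rest := by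
  intro h
  rcases List.prefix_or_prefix_of_prefix h (List.prefix_append g rest) with h' | h'
  · exact hg h'
  · obtain ⟨t', rfl⟩ := h'
    have h3 : t' <+: rest := (List.prefix_append_right_inj g).mp h
    cases t' with
    | nil => exact hg (by simp)
    | cons c t'' =>
      rcases hr with rfl | ⟨r', rfl⟩
      · simpa using h3.length_le
      · have : c = '[' := by
          obtain ⟨w, hw⟩ := h3
          exact (List.cons_eq_cons.mp hw).1
        exact ht (by simp [this])

-- one replace pass with pattern '[' :: t distributes over the '['-segments
lemma pvRepl_joinTail (t new : List Char) (ht : '[' ∉ t) :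
    ∀ segs : List (List Char), (∀ g ∈ segs, '[' ∉ g) →
      pvRepl '[' t new (pvJoinTail segs)
        = (segs.map (fun g => if t.isPrefixOf g then new ++ g.drop t.length else '[' :: g)).flatten := by
  intro segs
  induction segs with
  | nil => simp [pvJoinTail, pvRepl]
  | cons g rest ih =>
    intro hbf
    have hgbf : '[' ∉ g := hbf g (by simp)
    have hrest : ∀ x ∈ rest, '[' ∉ x := fun x hx => hbf x (by simp [hx])
    have hjt : pvJoinTail rest = [] ∨ ∃ r', pvJoinTail rest = '[' :: r' := by
      cases rest with
      | nil => left; simp [pvJoinTail]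
      | cons a b => right; exact ⟨a ++ pvJoinTail b, by simp [pvJoinTail]⟩
    show pvRepl '[' t new ('[' :: (g ++ pvJoinTail rest)) = _
    by_cases hp : t <+: g
    · obtain ⟨r, rfl⟩ := hp
      rw [pvRepl, if_pos (by
        simp only [List.isPrefixOf_iff_prefix, List.cons_prefix_cons]
        refine ⟨by trivial, ?_⟩
        rw [List.append_assoc]
        exact List.prefix_append _ _)]
      have hdrop : (t ++ r ++ pvJoinTail rest).drop t.length = r ++ pvJoinTail rest := by
        rw [List.append_assoc, List.drop_append, Nat.sub_self]
        simp
      rw [hdrop]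
      have hrbf : '[' ∉ r := fun m => hgbf (by simp [m])
      rw [pvRepl_bf_append t new r _ hrbf, ih hrest]
      simp only [List.map_cons, List.flatten_cons, List.isPrefixOf_iff_prefix]
      rw [if_pos (List.prefix_append t r), List.drop_left]
      simp
    · rw [pvRepl, if_neg (by
        simp only [List.isPrefixOf_iff_prefix, List.cons_prefix_cons]
        rintro ⟨-, hpre⟩
        exact pvNoCross t g _ ht hp hjt hpre)]
      rw [pvRepl_bf_append t new g _ hgbf, ih hrest]
      simp only [List.map_cons, List.flatten_cons, List.isPrefixOf_iff_prefix]
      rw [if_neg (by simpa using hp)]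
      simp

-- the per-segment effect of one replace pass, and its chain over the table
def pvStep (g : List Char) (p : List Char × List Char) : List Char :=
  if p.1.isPrefixOf g then p.2 ++ g.drop p.1.length else g

def pvChain (ps : List (List Char × List Char)) (g : List Char) : List Char :=
  ps.foldl pvStep g

lemma pvFoldChain :
    ∀ (ps : List (List Char × List Char)) (head : List Char) (segs : List (List Char)),
      (∀ p ∈ ps, '[' ∉ p.1 ∧ '[' ∉ p.2) → '[' ∉ head → (∀ g ∈ segs, '[' ∉ g) →
      ps.foldl (fun s p => pvRepl '[' p.1 ('[' :: p.2) s) (head ++ pvJoinTail segs)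
        = head ++ pvJoinTail (segs.map (pvChain ps)) := by
  intro ps
  induction ps with
  | nil => intro head segs _ _ _; unfold pvChain; simp [pvJoinTail, Function.comp_def]
  | cons p rest ih =>
    intro head segs hps hh hsegs
    have hp1 : '[' ∉ p.1 := (hps p (by simp)).1
    have hp2 : '[' ∉ p.2 := (hps p (by simp)).2
    rw [List.foldl_cons]
    rw [pvRepl_bf_append p.1 _ head _ hh]
    rw [pvRepl_joinTail p.1 _ hp1 segs hsegs]
    have hflat : (segs.map (fun g => if p.1.isPrefixOf g then ('[' :: p.2) ++ g.drop p.1.length else '[' :: g)).flatten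
        = pvJoinTail (segs.map (fun g => pvStep g p)) := by
      simp only [pvJoinTail, List.map_map]
      congr 1
      apply List.map_congr_left
      intro g _
      simp only [Function.comp, pvStep]
      split_ifs <;> simp
    rw [hflat]
    rw [ih head _ (fun q hq => hps q (by simp [hq])) hh (by
      intro g hg
      simp only [List.mem_map] at hg
      obtain ⟨x, hx, rfl⟩ := hg
      intro m
      simp only [pvStep] at m
      split_ifs at m with hpre
      · rcases List.mem_append.mp m with m | m
        · exact hp2 m
        · exact hsegs x hx (List.mem_of_mem_drop m)
      · exact hsegs x hx m)]
    simp only [List.map_map]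
    rfl

-- A's table, seen per '['-segment: (pattern after '[', replacement after '[')
def pvTA : List (List Char × List Char) :=
  [("Variant \"UltraBullet\"]".toList, "Variant \"\"]".toList),
   ("Variant \"Bullet\"]".toList, "Variant \"\"]".toList),
   ("Variant \"Blitz\"]".toList, "Variant \"\"]".toList),
   ("Variant \"Rapid\"]".toList, "Variant \"\"]".toList),
   ("Variant \"Classical\"]".toList, "Variant \"\"]".toList),
   ("Variant \"Correspondence\"]".toList, "Variant \"\"]".toList),
   ("Variant \"Standard\"]".toList, "Variant \"\"]".toList),
   ("Variant \"Chess960\"]".toList, "Variant \"Fischerandom\"]".toList),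
   ("Variant \"ThreeCheck\"]".toList, "Variant \"3check\"]".toList),
   ("Variant \"Antichess\"]".toList, "Variant \"Suicide\"]".toList)]

-- bridge: A's String-level foldl equals the list-level pvRepl foldl over pvTA
lemma pvAfold_gen :
    ∀ (reps : List (String × String × String)) (ta : List (List Char × List Char)),
      List.Forall₂ (fun rep p =>
        ("[" ++ rep.1 ++ " \"" ++ rep.2.1 ++ "\"]").toList = '[' :: p.1 ∧
        ("[" ++ rep.1 ++ " \"" ++ rep.2.2 ++ "\"]").toList = '[' :: p.2) reps ta →
      ∀ s : String,
      (reps.foldl (fun acc rep =>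
        PySem.Str.replace acc ("[" ++ rep.1 ++ " \"" ++ rep.2.1 ++ "\"]")
                              ("[" ++ rep.1 ++ " \"" ++ rep.2.2 ++ "\"]")) s).toList
        = ta.foldl (fun x p => pvRepl '[' p.1 ('[' :: p.2) x) s.toList := by
  intro reps ta h
  induction h with
  | nil => intro s; simp
  | cons hp hrest ih =>
    intro s
    rw [List.foldl_cons, List.foldl_cons, ih]
    congr 1
    rw [PySem.Str.replace, String.toList_ofList, hp.1, hp.2, pvReplace_eq]

lemma pvStrEq (x : String) (l : List Char) (h : x.toList = l) : x = String.ofList l := by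
  rw [← h, String.ofList_toList]

-- first-match semantics of the chain: once a rule fires, no later rule matches the result
def pvFirst (ps : List (List Char × List Char)) (g : List Char) : List Char :=
  match pvFindRule ps g with
  | some (u, r) => u ++ r
  | none => g

lemma pvStep_self (t u r : List Char) : pvStep (t ++ r) (t, u) = u ++ r := by
  unfold pvStep
  rw [if_pos (by simp only [List.isPrefixOf_iff_prefix]; exact List.prefix_append _ _)]
  rw [List.drop_left]

lemma pvChain_nomatch : ∀ (ps : List (List Char × List Char)) (g : List Char),
    (∀ p ∈ ps, ¬ p.1 <+: g) → pvChain ps g = g := by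
  intro ps
  induction ps with
  | nil => intro g _; rfl
  | cons p rest ih =>
    intro g h
    rw [show pvChain (p :: rest) g = pvChain rest (pvStep g p) from rfl]
    have hst : pvStep g p = g := by
      unfold pvStep
      rw [if_neg (by simpa [List.isPrefixOf_iff_prefix] using h p (by simp))]
    rw [hst]
    exact ih g (fun q hq => h q (by simp [hq]))

lemma pvChain_eq_first :
    ∀ (ps : List (List Char × List Char)),
      (∀ p ∈ ps, ∀ q ∈ ps, ¬ q.1 <+: p.2 ∧ ¬ p.2 <+: q.1) →
      ∀ g, pvChain ps g = pvFirst ps g := by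
  intro ps
  induction ps with
  | nil => intro _ g; rfl
  | cons p rest ih =>
    intro H g
    obtain ⟨t, u⟩ := p
    rw [show pvChain ((t, u) :: rest) g = pvChain rest (pvStep g (t, u)) from rfl]
    by_cases hp : t.isPrefixOf g
    · obtain ⟨r, rfl⟩ := List.isPrefixOf_iff_prefix.mp hp
      rw [pvStep_self]
      rw [pvChain_nomatch rest (u ++ r) (by
        intro q hq
        have := H (t, u) (by simp) q (by simp [hq])
        exact pvNPA this.1 this.2 r)]
      unfold pvFirst pvFindRule
      rw [if_pos hp, List.drop_left]
    · have hst : pvStep g (t, u) = g := by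
        unfold pvStep
        rw [if_neg hp]
      rw [hst, ih (fun a ha b hb => H a (by simp [ha]) b (by simp [hb])) g]
      unfold pvFirst
      rw [show pvFindRule ((t, u) :: rest) g = pvFindRule rest g from by
        simp [pvFindRule, hp]]

-- B's rule table is A's per-segment table with '[' prepended to each replacement
lemma pvFindRule_map :
    ∀ (psB psA : List (List Char × List Char)),
      List.Forall₂ (fun b a => b.1 = a.1 ∧ b.2 = '[' :: a.2) psB psA →
      ∀ g, pvFindRule psB g = (pvFindRule psA g).map (fun pr => ('[' :: pr.1, pr.2)) := by
  intro psB psA h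
  induction h with
  | nil => intro g; rfl
  | @cons b a psB' psA' hba _ ih =>
    intro g
    obtain ⟨tb, ub⟩ := b
    obtain ⟨ta, ua⟩ := a
    obtain ⟨h1, h2⟩ := hba
    simp only at h1 h2
    unfold pvFindRule
    rw [h1, h2]
    by_cases hp : ta.isPrefixOf g
    · rw [if_pos hp, if_pos hp]; rfl
    · rw [if_neg hp, if_neg hp, ih]

lemma pvRulesB_map : List.Forall₂ (fun b a => b.1 = a.1 ∧ b.2 = '[' :: a.2) pvRulesB pvTA := by
  unfold pvRulesB pvTA
  refine List.Forall₂.cons ⟨rfl, by decide⟩ ?_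
  refine List.Forall₂.cons ⟨rfl, by decide⟩ ?_
  refine List.Forall₂.cons ⟨rfl, by decide⟩ ?_
  refine List.Forall₂.cons ⟨rfl, by decide⟩ ?_
  refine List.Forall₂.cons ⟨rfl, by decide⟩ ?_
  refine List.Forall₂.cons ⟨rfl, by decide⟩ ?_
  refine List.Forall₂.cons ⟨rfl, by decide⟩ ?_
  refine List.Forall₂.cons ⟨rfl, by decide⟩ ?_
  refine List.Forall₂.cons ⟨rfl, by decide⟩ ?_
  refine List.Forall₂.cons ⟨rfl, by decide⟩ ?_
  exact List.Forall₂.nil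

lemma pvFindRule_len : ∀ (ps : List (List Char × List Char)) (l new r : List Char),
    pvFindRule ps l = some (new, r) → r.length ≤ l.length := by
  intro ps
  induction ps with
  | nil => intro l new r h; simp [pvFindRule] at h
  | cons p rest ih =>
    intro l new r h
    obtain ⟨tag, nw⟩ := p
    unfold pvFindRule at h
    split_ifs at h with hp
    · simp only [Option.some.injEq, Prod.mk.injEq] at h
      obtain ⟨-, h2⟩ := h
      subst h2
      simpa using List.length_drop ▸ Nat.sub_le _ _
    · exact ih l new r h

lemma pvFindRule_suffix : ∀ (ps : List (List Char × List Char)) (l new r : List Char),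
    pvFindRule ps l = some (new, r) → r <:+ l := by
  intro ps
  induction ps with
  | nil => intro l new r h; simp [pvFindRule] at h
  | cons p rest ih =>
    intro l new r h
    obtain ⟨tag, nw⟩ := p
    unfold pvFindRule at h
    split_ifs at h with hp
    · simp only [Option.some.injEq, Prod.mk.injEq] at h
      obtain ⟨-, h2⟩ := h
      subst h2
      exact List.drop_suffix _ _
    · exact ih l new r h

lemma pvScanGo_stable : ∀ (f1 : Nat) (l : List Char), l.length ≤ f1 →
    ∀ (f2 : Nat), l.length ≤ f2 → pvScanGo f1 l = pvScanGo f2 l := by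
  intro f1
  induction f1 with
  | zero =>
    intro l h f2 _
    have : l = [] := List.eq_nil_of_length_eq_zero (Nat.le_zero.mp h)
    subst this
    cases f2 <;> rfl
  | succ n1 ih =>
    intro l h f2 h2
    cases l with
    | nil => cases f2 <;> rfl
    | cons c t =>
      cases f2 with
      | zero => simp at h2
      | succ n2 =>
        show pvScanGo (n1 + 1) (c :: t) = pvScanGo (n2 + 1) (c :: t)
        rw [pvScanGo, pvScanGo]
        by_cases hc : c = '['
        · rw [if_pos hc, if_pos hc]
          rcases hf : pvFindRule pvRulesB t with _ | ⟨new, r⟩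
          · simp only [hf]
            rw [ih t (Nat.le_of_succ_le_succ h) n2 (Nat.le_of_succ_le_succ h2)]
          · have hr := pvFindRule_len pvRulesB t new r hf
            simp only [hf]
            rw [ih r (Nat.le_trans hr (Nat.le_of_succ_le_succ h)) n2
                (Nat.le_trans hr (Nat.le_of_succ_le_succ h2))]
        · rw [if_neg hc, if_neg hc,
            ih t (Nat.le_of_succ_le_succ h) n2 (Nat.le_of_succ_le_succ h2)]

lemma pvScan_cons (c : Char) (t : List Char) :
    pvScan (c :: t) = if c = '[' then
        (match pvFindRule pvRulesB t with
         | some (new, r) => new ++ pvScan r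
         | none => c :: pvScan t)
      else c :: pvScan t := by
  show pvScanGo (t.length + 1 + 1) (c :: t) = _
  rw [pvScanGo]
  by_cases hc : c = '['
  · rw [if_pos hc, if_pos hc]
    rcases hf : pvFindRule pvRulesB t with _ | ⟨new, r⟩
    · simp only [hf]
      rfl
    · have hr := pvFindRule_len pvRulesB t new r hf
      simp only [hf]
      rw [pvScanGo_stable (t.length + 1) r (Nat.le_succ_of_le hr) (r.length + 1) (Nat.le_succ _)]
      rfl
  · rw [if_neg hc, if_neg hc]
    rfl

-- the scan passes '['-free text through unchanged
lemma pvScan_bf_append (h : List Char) (hh : '[' ∉ h) (l : List Char) :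
    pvScan (h ++ l) = h ++ pvScan l := by
  induction h with
  | nil => simp
  | cons c h' ih =>
    have hc : c ≠ '[' := fun e => hh (by simp [e])
    rw [List.cons_append, pvScan_cons, if_neg hc, ih (fun m => hh (by simp [m]))]
    rfl

set_option maxRecDepth 4000 in
lemma pvFindRule_bf : ∀ p ∈ pvRulesB, '[' ∉ p.1 := by decide

-- rule lookup on a '['-free segment followed by the rest of the string looks only at the segment
lemma pvFindRule_cross :
    ∀ (ps : List (List Char × List Char)), (∀ p ∈ ps, '[' ∉ p.1) →
      ∀ (g jt : List Char), '[' ∉ g → (jt = [] ∨ ∃ r', jt = '[' :: r') →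
      pvFindRule ps (g ++ jt) = (pvFindRule ps g).map (fun pr => (pr.1, pr.2 ++ jt)) := by
  intro ps
  induction ps with
  | nil => intro _ g jt _ _; rfl
  | cons p rest ih =>
    intro hbf g jt hg hjt
    obtain ⟨t, u⟩ := p
    have ht : '[' ∉ t := hbf (t, u) (by simp)
    unfold pvFindRule
    by_cases hp : t.isPrefixOf g
    · have hlen : t.length ≤ g.length := (List.isPrefixOf_iff_prefix.mp hp).length_le
      rw [if_pos (by
        simp only [List.isPrefixOf_iff_prefix] at hp ⊢
        exact hp.trans (List.prefix_append g jt))]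
      rw [if_pos hp]
      simp [List.drop_append_of_le_length hlen]
    · rw [if_neg (by
        simp only [List.isPrefixOf_iff_prefix] at hp ⊢
        exact pvNoCross t g jt ht hp hjt)]
      rw [if_neg hp]
      exact ih (fun q hq => hbf q (by simp [hq])) g jt hg hjt

-- the scan over the '['-segments is the first-match rewrite of each segment
lemma pvScan_joinTail :
    ∀ segs : List (List Char), (∀ g ∈ segs, '[' ∉ g) →
      pvScan (pvJoinTail segs) = (segs.map (fun g => '[' :: pvFirst pvTA g)).flatten := by
  intro segs
  induction segs with
  | nil => intro _; rfl
  | cons g rest ih =>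
    intro hbf
    have hgbf : '[' ∉ g := hbf g (by simp)
    have hrest : ∀ x ∈ rest, '[' ∉ x := fun x hx => hbf x (by simp [hx])
    have hjt : pvJoinTail rest = [] ∨ ∃ r', pvJoinTail rest = '[' :: r' := by
      cases rest with
      | nil => left; simp [pvJoinTail]
      | cons a b => right; exact ⟨a ++ pvJoinTail b, by simp [pvJoinTail]⟩
    show pvScan ('[' :: (g ++ pvJoinTail rest)) = _
    rw [pvScan_cons, if_pos rfl]
    rw [pvFindRule_cross pvRulesB pvFindRule_bf g (pvJoinTail rest) hgbf hjt]
    rw [pvFindRule_map pvRulesB pvTA pvRulesB_map g]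
    rcases hf : pvFindRule pvTA g with _ | ⟨u, r⟩
    · simp only [hf, Option.map_none]
      rw [pvScan_bf_append g hgbf, ih hrest]
      simp [pvFirst, hf]
    · simp only [hf, Option.map_some]
      have hr : '[' ∉ r := fun m =>
        hgbf ((pvFindRule_suffix pvTA g u r hf).subset m)
      rw [pvScan_bf_append r hr, ih hrest]
      simp [pvFirst, hf]

-- A's ten passes never interfere: no pattern matches any produced replacement
set_option maxRecDepth 4000 in
lemma pvTA_noInterfere : ∀ p ∈ pvTA, ∀ q ∈ pvTA, ¬ q.1 <+: p.2 ∧ ¬ p.2 <+: q.1 := by decide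

set_option maxRecDepth 4000 in
lemma pvTA_bf : ∀ p ∈ pvTA, '[' ∉ p.1 ∧ '[' ∉ p.2 := by decide

lemma pvRepsA_forall2 :
    List.Forall₂ (fun rep p =>
      ("[" ++ rep.1 ++ " \"" ++ rep.2.1 ++ "\"]").toList = '[' :: p.1 ∧
      ("[" ++ rep.1 ++ " \"" ++ rep.2.2 ++ "\"]").toList = '[' :: p.2) pvRepsA pvTA := by
  unfold pvRepsA pvTA
  refine List.Forall₂.cons ⟨by decide, by decide⟩ ?_
  refine List.Forall₂.cons ⟨by decide, by decide⟩ ?_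
  refine List.Forall₂.cons ⟨by decide, by decide⟩ ?_
  refine List.Forall₂.cons ⟨by decide, by decide⟩ ?_
  refine List.Forall₂.cons ⟨by decide, by decide⟩ ?_
  refine List.Forall₂.cons ⟨by decide, by decide⟩ ?_
  refine List.Forall₂.cons ⟨by decide, by decide⟩ ?_
  refine List.Forall₂.cons ⟨by decide, by decide⟩ ?_
  refine List.Forall₂.cons ⟨by decide, by decide⟩ ?_
  refine List.Forall₂.cons ⟨by decide, by decide⟩ ?_
  exact List.Forall₂.nil

-- phase 1 of both programs agrees: ten sequential passes = one first-match scan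
lemma pvPhase1 (s : String) :
    (pvRepsA.foldl (fun acc rep =>
      PySem.Str.replace acc ("[" ++ rep.1 ++ " \"" ++ rep.2.1 ++ "\"]")
                            ("[" ++ rep.1 ++ " \"" ++ rep.2.2 ++ "\"]")) s).toList
      = pvScan s.toList := by
  rw [pvAfold_gen pvRepsA pvTA pvRepsA_forall2 s]
  rcases hps : pvSplit1 s.toList with _ | ⟨h0, segs⟩
  · exact absurd hps (pvSplit1_ne_nil s.toList)
  have hsplit : s.toList = h0 ++ pvJoinTail segs := by
    have := pvSplit1_join s.toList
    rw [hps] at this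
    simpa using this
  have hbf := pvSplit1_bf s.toList
  rw [hps] at hbf
  have hh0 : '[' ∉ h0 := hbf h0 (by simp)
  have hsegs : ∀ g ∈ segs, '[' ∉ g := fun g hg => hbf g (by simp [hg])
  rw [hsplit]
  rw [pvFoldChain pvTA h0 segs pvTA_bf hh0 hsegs]
  rw [pvScan_bf_append h0 hh0, pvScan_joinTail segs hsegs]
  congr 1
  simp only [pvJoinTail, List.map_map]
  congr 1
  apply List.map_congr_left
  intro g _
  simp only [Function.comp_apply]
  rw [pvChain_eq_first pvTA pvTA_noInterfere g]

-- ===== VERDICT (by name: the statement is the Claim_ definition above) =====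
theorem adjust_tags_spec : Claim_equal_adjust_tags := by
  intro pgn _
  unfold Spec_adjust_tags
  rcases pgn with _ | s
  · rfl
  · show adjust_tags (some s) = adjust_tags_alt (some s)
    rw [show adjust_tags (some s) = if s = "" then some s else some (pvBodyA s) from rfl,
      show adjust_tags_alt (some s) = if s = "" then some s else some (pvBodyB s) from rfl]
    by_cases hs : s = ""
    · rw [if_pos hs, if_pos hs]
    · rw [if_neg hs, if_neg hs]
      refine congrArg some ?_
      simp only [pvBodyA, pvBodyB]
      rw [pvStrEq _ _ (pvPhase1 s)]
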